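-- pv_equiv track=rewrite | github.com/siva9800/codemind-python | Distinct_subarray_.py | DistarrayoddSum
-- ===== SOURCE A (Python) =====
-- def DistarrayoddSum(m,n):
--     c=(n-m)+1
--     co=0
--     v=[0]*c
--     for i in range(c):
--         v[i]=m
--         m+=1
--     for i in range(c):
--         if v[i]%2!=0:
--             co+=1
--         for j in range(i,c):
--             s=v[i]+v[j]
--             if s%2!=0:
--                 co+=1
--     return co
-- ===== SOURCE B (Python) =====
-- def DistarrayoddSum(m, n):
--     if n < m:
--         return 0
--     odds = (n + 1) // 2 - m // 2
--     evens = (n - m + 1) - odds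
--     return odds + odds * evens
-- ===== Notes on version B (the rewrite author's own statement) =====
-- stated objective: alternative
-- what changed: B replaces A's list-building loop and nested pair loop with a closed form: the number of odd values in [m,n] plus odds*evens, both counted arithmetically with floor division.
import Mathlib
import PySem

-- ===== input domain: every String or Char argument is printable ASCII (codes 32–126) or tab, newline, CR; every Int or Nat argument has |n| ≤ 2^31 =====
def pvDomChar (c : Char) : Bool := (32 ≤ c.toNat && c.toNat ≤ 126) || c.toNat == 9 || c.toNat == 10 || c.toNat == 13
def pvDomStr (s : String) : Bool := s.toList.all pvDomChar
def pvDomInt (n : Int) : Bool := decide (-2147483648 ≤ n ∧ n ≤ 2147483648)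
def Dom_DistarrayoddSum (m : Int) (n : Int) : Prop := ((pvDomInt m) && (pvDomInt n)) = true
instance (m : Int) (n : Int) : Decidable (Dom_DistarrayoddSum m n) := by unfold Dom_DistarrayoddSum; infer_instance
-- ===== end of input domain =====

-- B replaces A's list-building loop and nested pair loop with a closed form:
-- odds + odds*evens, counting the odd/even integers in [m,n] arithmetically.

-- ===== PORT A =====
def DistarrayoddSum (m : Int) (n : Int) : Int :=
  let c : Int := (n - m) + 1
  let v0 : List Int := List.replicate c.toNat 0        -- v = [0]*c  (empty when c ≤ 0, as in Python)
  -- first loop: for i in range(c): v[i] = m; m += 1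
  let st := (PySem.List.pyRange 0 c 1).foldl
      (fun (st : List Int × Int) i => (PySem.List.pySetD st.1 i st.2, st.2 + 1)) (v0, m)
  let v := st.1
  -- second loop: nested counting
  (PySem.List.pyRange 0 c 1).foldl
    (fun co i =>
      (PySem.List.pyRange i c 1).foldl
        (fun co j =>
          if PySem.Int.mod (PySem.List.pyGetD v i 0 + PySem.List.pyGetD v j 0) 2 ≠ 0 then co + 1 else co)
        (if PySem.Int.mod (PySem.List.pyGetD v i 0) 2 ≠ 0 then co + 1 else co))
    0

-- ===== PORT B =====
def DistarrayoddSum_alt (m : Int) (n : Int) : Int :=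
  if n < m then 0
  else
    let odds := PySem.Int.floordiv (n + 1) 2 - PySem.Int.floordiv m 2
    let evens := (n - m + 1) - odds
    odds + odds * evens

-- ===== PRECONDITION & SPEC =====
def Spec_DistarrayoddSum (m : Int) (n : Int) (out : Int) : Prop := out = DistarrayoddSum_alt m n
instance (m : Int) (n : Int) (out : Int) : Decidable (Spec_DistarrayoddSum m n out) := by unfold Spec_DistarrayoddSum; infer_instance

-- ===== CLAIM (what is proved, stated in full; the proofs are below) =====
def Claim_equal_DistarrayoddSum : Prop := ∀ (m : Int) (n : Int), Dom_DistarrayoddSum m n → Spec_DistarrayoddSum m n (DistarrayoddSum m n)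

-- ===== LEMMAS AND PROOFS =====

-- "x % 2 != 0" as a Bool predicate
def podd (x : Int) : Bool := decide (PySem.Int.mod x 2 ≠ 0)

-- recursive reformulation of A's counting double loop over the value list
def tally : List Int → Int
  | [] => 0
  | a :: t => (if podd a then 1 else 0) + (((a :: t).countP (fun x => podd (a + x)) : Nat) : Int) + tally t

-- the build loop produces the list of consecutive integers
lemma build_loop : ∀ (d : Nat) (t k : Nat) (w : List Int) (a : Int), w.length = t → k ≤ t → d = t - k →
    ((PySem.List.pyRange (k : Int) (t : Int) 1).foldl
        (fun (st : List Int × Int) i => (PySem.List.pySetD st.1 i st.2, st.2 + 1)) (w, a)).1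
      = w.take k ++ PySem.List.pyRange a (a + ((t - k : Nat) : Int)) 1 := by
  intro d
  induction d with
  | zero =>
    intro t k w a hw hk hd
    have hkt : k = t := by omega
    subst hkt
    rw [PySem.List.pyRange_one_eq_nil (by omega)]
    simp [hw, PySem.List.pyRange_one_eq_nil]
  | succ d ih =>
    intro t k w a hw hk hd
    have hkt : k < t := by omega
    rw [PySem.List.pyRange_one_cons (by exact_mod_cast hkt)]
    simp only [List.foldl_cons]
    have hcast : ((k : Int) + 1) = ((k + 1 : Nat) : Int) := by push_cast; ring
    rw [PySem.List.pySetD_natCast, hcast,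
        ih t (k + 1) (w.set k a) (a + 1) (by simp [hw]) (by omega) (by omega)]
    have hsplit : (w.set k a).take (k + 1) = w.take k ++ [a] := by
      rw [List.set_eq_take_append_cons_drop, if_pos (by omega),
          List.take_append, List.take_take]
      have h2 : (w.take k).length = k := by simp [hw]; omega
      rw [h2, Nat.min_eq_right (by omega), Nat.add_sub_cancel_left]
      simp
    rw [hsplit, List.append_assoc]
    congr 1
    have h3 : a + ((t - k : Nat) : Int) = (a + 1) + ((t - (k + 1) : Nat) : Int) := by
      have he : (t - k : Nat) = (t - (k + 1)) + 1 := by omega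
      rw [he]; push_cast; ring
    rw [PySem.List.pyRange_one_cons (show a < a + ((t - k : Nat) : Int) by omega), h3]
    simp

-- the counting double loop computes `tally` of the suffix
lemma outer_loop (v : List Int) : ∀ (d : Nat) (k : Nat) (co : Int), k ≤ v.length → d = v.length - k →
    (PySem.List.pyRange (k : Int) ((v.length : Nat) : Int) 1).foldl
      (fun co i =>
        (PySem.List.pyRange i ((v.length : Nat) : Int) 1).foldl
          (fun co j =>
            if PySem.Int.mod (PySem.List.pyGetD v i 0 + PySem.List.pyGetD v j 0) 2 ≠ 0 then co + 1 else co)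
          (if PySem.Int.mod (PySem.List.pyGetD v i 0) 2 ≠ 0 then co + 1 else co))
      co = co + tally (v.drop k) := by
  intro d
  induction d with
  | zero =>
    intro k co hk hd
    have hkt : k = v.length := by omega
    subst hkt
    rw [PySem.List.pyRange_one_eq_nil (by omega)]
    simp [tally]
  | succ d ih =>
    intro k co hk hd
    have hkt : k < v.length := by omega
    rw [PySem.List.pyRange_one_cons (by exact_mod_cast hkt)]
    simp only [List.foldl_cons]
    have hget : PySem.List.pyGetD v (k : Int) 0 = v[k] := PySem.List.pyGetD_ofNat v k 0 hkt
    rw [hget]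
    have hinner := PySem.List.foldl_pyRange_pyGetD' v 0
        (fun co x => if PySem.Int.mod (v[k] + x) 2 ≠ 0 then co + 1 else co)
        (if PySem.Int.mod v[k] 2 ≠ 0 then co + 1 else co) (a := (k : Int)) (by omega)
    simp only [Int.toNat_natCast] at hinner
    rw [hinner]
    rw [PySem.List.foldl_ite_add_one]
    have hcast : ((k : Int) + 1) = ((k + 1 : Nat) : Int) := by push_cast; ring
    rw [hcast, ih (k + 1) _ (by omega) (by omega)]
    have hdrop : v.drop k = v[k] :: v.drop (k + 1) := (List.getElem_cons_drop hkt).symm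
    rw [hdrop]
    show _ = co + tally (v[k] :: v.drop (k + 1))
    rw [tally]
    rw [← hdrop]
    have : (fun x => decide (PySem.Int.mod (v[k] + x) 2 ≠ 0)) = (fun x => podd (v[k] + x)) := by
      funext x; simp [podd]
    rw [this]
    have hm : PySem.Int.mod v[k] 2 = v[k] % 2 := PySem.Int.mod_eq_emod_of_pos (by norm_num)
    by_cases h : v[k] % 2 = 1
    · simp [podd, h]
      ring
    · have h0 : v[k] % 2 = 0 := by omega
      simp [podd, h0]
      ring

-- tally of any list equals odds + odds*evens of that list
lemma tally_closed (L : List Int) :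
    tally L = ((L.countP podd : Nat) : Int) + ((L.countP podd : Nat) : Int) * ((L.countP (fun x => !podd x) : Nat) : Int) := by
  induction L with
  | nil => simp [tally]
  | cons a t ih =>
    have hmod : ∀ x : Int, PySem.Int.mod x 2 = x % 2 := fun x => PySem.Int.mod_eq_emod_of_pos (by norm_num)
    have hcnt : t.countP (fun x => podd (a + x)) = if podd a then t.countP (fun x => !podd x) else t.countP podd := by
      by_cases h : podd a
      · simp only [h, if_true]
        apply List.countP_congr
        intro x _
        simp only [podd, hmod] at *
        constructor <;> intro hx <;> simp_all <;> omega
      · simp only [h]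
        apply List.countP_congr
        intro x _
        simp only [podd, hmod] at *
        constructor <;> intro hx <;> simp_all <;> omega
    have hself : podd (a + a) = false := by
      simp only [podd, hmod]
      simp
      omega
    rw [tally, ih]
    simp only [List.countP_cons, hcnt, hself]
    by_cases h : podd a <;> simp [h] <;> ring

-- count of odd integers in a consecutive range, in closed form
lemma count_odds : ∀ (t : Nat) (a : Int),
    (((PySem.List.pyRange a (a + (t : Int)) 1).countP podd : Nat) : Int)
      = PySem.Int.floordiv (a + (t : Int)) 2 - PySem.Int.floordiv a 2 := by
  intro t
  induction t with
  | zero =>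
    intro a
    rw [Int.natCast_zero, add_zero, PySem.List.pyRange_one_eq_nil le_rfl]
    simp
  | succ t ih =>
    intro a
    have hlt : a < a + ((t + 1 : Nat) : Int) := by push_cast; omega
    rw [PySem.List.pyRange_one_cons hlt, List.countP_cons]
    have h1 : a + 1 + (t : Int) = a + ((t + 1 : Nat) : Int) := by push_cast; ring
    have hrec := ih (a + 1)
    rw [h1] at hrec
    push_cast at hrec ⊢
    rw [hrec]
    have hfd : ∀ x : Int, PySem.Int.floordiv x 2 = x / 2 := fun x => PySem.Int.floordiv_eq_ediv_of_pos (by norm_num)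
    have hmod : PySem.Int.mod a 2 = a % 2 := PySem.Int.mod_eq_emod_of_pos (by norm_num)
    simp only [podd, hmod, hfd]
    by_cases h : a % 2 ≠ 0 <;> simp [h] <;> omega

-- the two parity counts partition the list
lemma countP_split (L : List Int) :
    L.countP podd + L.countP (fun x => !podd x) = L.length := by
  induction L with
  | nil => simp
  | cons a t ih => by_cases h : podd a <;> simp [h] <;> omega

-- ===== VERDICT (by name: the statement is the Claim_ definition above) =====
theorem DistarrayoddSum_spec : Claim_equal_DistarrayoddSum := by
  intro m n _
  unfold Spec_DistarrayoddSum DistarrayoddSum DistarrayoddSum_alt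
  by_cases hlt : n < m
  · -- c ≤ 0 : all ranges empty, A returns 0
    simp only
    rw [PySem.List.pyRange_one_eq_nil (by omega)]
    simp [hlt]
  · -- m ≤ n
    simp only [if_neg hlt]
    have hct : (((n - m + 1).toNat : Nat) : Int) = n - m + 1 := Int.toNat_of_nonneg (by omega)
    -- the built list is [m, m+1, …, n]
    have hb := build_loop ((n - m + 1).toNat) ((n - m + 1).toNat) 0
        (List.replicate ((n - m) + 1).toNat 0) m (by simp) (by omega) (by omega)
    simp only [Nat.cast_zero, List.take_zero, Nat.sub_zero, List.nil_append] at hb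
    rw [hct, show m + (n - m + 1) = n + 1 by omega] at hb
    rw [hb]
    set v : List Int := PySem.List.pyRange m (n + 1) 1 with hv
    have hvlen : ((v.length : Nat) : Int) = n - m + 1 := by
      rw [hv, PySem.List.length_pyRange_one]; omega
    rw [← hvlen]
    have ho := outer_loop v v.length 0 0 (by omega) (by omega)
    simp only [Nat.cast_zero, List.drop_zero] at ho
    rw [ho, zero_add, tally_closed]
    have hcount := count_odds ((n - m + 1).toNat) m
    rw [hct, show m + (n - m + 1) = n + 1 by omega, ← hv] at hcount
    have hs : ((v.countP podd : Nat) : Int) + ((v.countP (fun x => !podd x) : Nat) : Int)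
        = n - m + 1 := by
      rw [← hvlen]; exact_mod_cast countP_split v
    rw [hcount] at hs ⊢
    set O : Int := PySem.Int.floordiv (n + 1) 2 - PySem.Int.floordiv m 2 with hO
    have hE : ((v.countP (fun x => !podd x) : Nat) : Int) = (n - m + 1) - O := by omega
    rw [hE, hvlen]
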